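-- pv_equiv track=rewrite | github.com/stikos/rosalind | Bioinformatics_Stronghold/corr.py | check_reads
-- ===== SOURCE A (Python) =====
-- complements = {'A' : 'T', 'G' : 'C', 'C' : 'G', 'T' : 'A'}
--
-- def check_reads(read1, read2):
-- 	comp_read2 = ''.join([complements[x] for x in read2][::-1])
-- 	comp_count = 0
-- 	h_count = 0
-- 	for i, j, k in zip(read1, read2, comp_read2):
-- 		if i != j:
-- 			h_count += 1
-- 		if i != k:
-- 			comp_count += 1
-- 		if h_count > 1 and comp_count > 1:
-- 			return None
-- 	return read2
-- ===== SOURCE B (Python) =====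
-- complements = {'A' : 'T', 'G' : 'C', 'C' : 'G', 'T' : 'A'}
--
-- def within_one(s, t):
--     # scan to the first mismatch; accept iff the remaining truncated suffixes are equal
--     n = min(len(s), len(t))
--     i = 0
--     while i < n and s[i] == t[i]:
--         i += 1
--     return i == n or s[i+1:n] == t[i+1:n]
--
-- def check_reads(read1, read2):
--     comp = ''.join(complements[x] for x in read2)[::-1]
--     return read2 if within_one(read1, read2) or within_one(read1, comp) else None
-- ===== Notes on version B (the rewrite author's own statement) =====
-- stated objective: alternative
-- what changed: Replaced A's fused mismatch-counting loop with two counter-free first-mismatch scans: scan to the first differing position and accept iff the remaining truncated suffixes are equal as strings (against read2 and against its reverse complement).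
import Mathlib
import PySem

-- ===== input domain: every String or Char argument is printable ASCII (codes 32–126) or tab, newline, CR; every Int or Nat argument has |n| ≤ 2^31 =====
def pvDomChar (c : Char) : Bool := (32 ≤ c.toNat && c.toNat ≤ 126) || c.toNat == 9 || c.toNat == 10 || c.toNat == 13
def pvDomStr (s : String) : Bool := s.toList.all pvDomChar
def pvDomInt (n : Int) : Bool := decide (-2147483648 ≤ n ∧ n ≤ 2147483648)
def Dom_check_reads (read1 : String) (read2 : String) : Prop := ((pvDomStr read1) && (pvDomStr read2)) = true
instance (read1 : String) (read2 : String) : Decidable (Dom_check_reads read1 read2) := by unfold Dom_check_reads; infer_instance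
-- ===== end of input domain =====

-- B replaces A's fused two-counter early-exit loop with two counter-free first-mismatch
-- scans (scan to the first differing position, then compare the remaining truncated
-- suffixes for equality): a different decomposition, same O(n) cost.


-- Shared module constant: the complements dict lookup.  Exact on Pre_ (chars of read2 in
-- 'AGCT'); outside Pre_ both Pythons raise KeyError, which Pre_ excludes.
def pyComplement (c : Char) : Char :=
  if c = 'A' then 'T' else if c = 'G' then 'C' else if c = 'C' then 'G'
  else if c = 'T' then 'A' else c

-- ===== PORT A =====
-- A's fused loop over zip(read1, read2, comp_read2) with two counters and early exit.
def checkLoopA : List (Char × Char × Char) → Int → Int → String → Option String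
  | [], _, _, r2 => some r2
  | (i, j, k) :: rest, h, c, r2 =>
    let h' := if i ≠ j then h + 1 else h
    let c' := if i ≠ k then c + 1 else c
    if h' > 1 ∧ c' > 1 then none else checkLoopA rest h' c' r2

def check_reads (read1 : String) (read2 : String) : Option String :=
  let comp_read2 := String.ofList ((read2.toList.map pyComplement).reverse)
  checkLoopA (read1.toList.zip (read2.toList.zip comp_read2.toList)) 0 0 read2

-- ===== PORT B =====
-- B's within_one: scan to the first mismatch (the while loop), then accept iff the
-- remaining suffixes, truncated to the common length, are equal.
def withinOne : List Char → List Char → Bool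
  | x :: xs, y :: ys =>
    if x = y then withinOne xs ys
    else
      let k := min xs.length ys.length
      decide (xs.take k = ys.take k)
  | _, _ => true

def check_reads_alt (read1 : String) (read2 : String) : Option String :=
  let comp := String.ofList ((read2.toList.map pyComplement).reverse)
  if withinOne read1.toList read2.toList || withinOne read1.toList comp.toList then
    some read2
  else none

-- ===== PRECONDITION & SPEC =====
-- Pre_ excludes exactly the inputs where both Pythons raise KeyError: read2 containing a
-- character other than A, G, C, T.
def Pre_check_reads (read1 : String) (read2 : String) : Prop :=
  read2.toList.all (fun c => c == 'A' || c == 'G' || c == 'C' || c == 'T') = true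
instance (read1 : String) (read2 : String) : Decidable (Pre_check_reads read1 read2) := by
  unfold Pre_check_reads; infer_instance

def pvWitness_check_reads : String × String := ("ACGT", "AGGT")

def Spec_check_reads (read1 : String) (read2 : String) (out : Option String) : Prop :=
  out = check_reads_alt read1 read2
instance (read1 : String) (read2 : String) (out : Option String) : Decidable (Spec_check_reads read1 read2 out) := by
  unfold Spec_check_reads; infer_instance

-- ===== CLAIM (what is proved, stated in full; the proofs are below) =====
def Claim_equal_check_reads : Prop := ∀ (read1 : String) (read2 : String), Dom_check_reads read1 read2 → Pre_check_reads read1 read2 → Spec_check_reads read1 read2 (check_reads read1 read2)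

-- ===== LEMMAS AND PROOFS =====

-- A's early-exit loop, entered with the counters not both > 1, returns none iff both
-- final mismatch totals exceed 1.
theorem checkLoopA_eq (l : List (Char × Char × Char)) (h c : Int) (r2 : String)
    (hnb : ¬ (h > 1 ∧ c > 1)) :
    checkLoopA l h c r2 =
      if h + (l.countP (fun t => t.1 ≠ t.2.1) : Int) ≤ 1 ∨
         c + (l.countP (fun t => t.1 ≠ t.2.2) : Int) ≤ 1 then some r2 else none := by
  induction l generalizing h c with
  | nil => simp only [List.countP_nil, Nat.cast_zero, add_zero, checkLoopA]; rw [if_pos (by omega)]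
  | cons x rest ih =>
    obtain ⟨i, j, k⟩ := x
    have hr1 : (0:Int) ≤ (rest.countP (fun t : Char × Char × Char => t.1 ≠ t.2.1) : Int) :=
      Int.natCast_nonneg _
    have hr2 : (0:Int) ≤ (rest.countP (fun t : Char × Char × Char => t.1 ≠ t.2.2) : Int) :=
      Int.natCast_nonneg _
    simp only [checkLoopA, List.countP_cons]
    have e1 : (if i ≠ j then h + 1 else h) = h + (if i ≠ j then (1:Int) else 0) := by
      split <;> ring
    have e2 : (if i ≠ k then c + 1 else c) = c + (if i ≠ k then (1:Int) else 0) := by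
      split <;> ring
    rw [e1, e2]
    push_cast
    simp only [decide_eq_true_eq]
    have hd1 : (0:Int) ≤ (if i ≠ j then (1:Int) else 0) ∧ (if i ≠ j then (1:Int) else 0) ≤ 1 := by
      split <;> norm_num
    have hd2 : (0:Int) ≤ (if i ≠ k then (1:Int) else 0) ∧ (if i ≠ k then (1:Int) else 0) ≤ 1 := by
      split <;> norm_num
    generalize hg1 : (if i ≠ j then (1:Int) else 0) = d1 at hd1 ⊢
    generalize hg2 : (if i ≠ k then (1:Int) else 0) = d2 at hd2 ⊢
    by_cases hstop : h + d1 > 1 ∧ c + d2 > 1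
    · rw [if_pos hstop, if_neg (by omega)]
    · rw [if_neg hstop, ih _ _ hstop]
      obtain ⟨hd1a, hd1b⟩ := hd1
      obtain ⟨hd2a, hd2b⟩ := hd2
      split_ifs with ha hb hb
      · rfl
      · exact absurd (by omega : h + (↑(rest.countP fun t => t.1 ≠ t.2.1) + d1) ≤ 1 ∨
          c + (↑(rest.countP fun t => t.1 ≠ t.2.2) + d2) ≤ 1) hb
      · exact absurd (by omega : h + d1 + ↑(rest.countP fun t => t.1 ≠ t.2.1) ≤ 1 ∨
          c + d2 + ↑(rest.countP fun t => t.1 ≠ t.2.2) ≤ 1) ha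
      · rfl

-- Projecting a zip-of-zips count to a two-list count (lengths of l2 and l3 equal).
theorem countP_zip3_fst (l1 l2 l3 : List Char) (hlen : l2.length = l3.length) :
    (l1.zip (l2.zip l3)).countP (fun t => t.1 ≠ t.2.1)
      = (l1.zip l2).countP (fun p => p.1 ≠ p.2) := by
  induction l1 generalizing l2 l3 with
  | nil => simp
  | cons a l1 ih =>
    cases l2 with
    | nil => cases l3 with | nil => simp | cons b l3 => simp at hlen
    | cons b l2 =>
      cases l3 with
      | nil => simp at hlen
      | cons d l3 =>
        simp only [List.zip_cons_cons, List.countP_cons]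
        rw [ih l2 l3 (by simpa using hlen)]

theorem countP_zip3_snd (l1 l2 l3 : List Char) (hlen : l2.length = l3.length) :
    (l1.zip (l2.zip l3)).countP (fun t => t.1 ≠ t.2.2)
      = (l1.zip l3).countP (fun p => p.1 ≠ p.2) := by
  induction l1 generalizing l2 l3 with
  | nil => simp
  | cons a l1 ih =>
    cases l2 with
    | nil => cases l3 with | nil => simp | cons b l3 => simp at hlen
    | cons b l2 =>
      cases l3 with
      | nil => simp at hlen
      | cons d l3 =>
        simp only [List.zip_cons_cons, List.countP_cons]
        rw [ih l2 l3 (by simpa using hlen)]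

-- Zero mismatches over the zip is equality of the common-length truncations.
theorem countP_zip_eq_zero_iff (xs ys : List Char) :
    (xs.zip ys).countP (fun p => p.1 ≠ p.2) = 0 ↔
      xs.take (min xs.length ys.length) = ys.take (min xs.length ys.length) := by
  induction xs generalizing ys with
  | nil => simp
  | cons x xs ih =>
    cases ys with
    | nil => simp
    | cons y ys =>
      simp only [List.zip_cons_cons, List.countP_cons, List.length_cons,
        Nat.succ_min_succ, List.take_succ_cons, decide_eq_true_eq]
      by_cases hxy : x = y
      · rw [if_neg (not_not_intro hxy), add_zero, ih ys]
        subst hxy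
        exact ⟨fun h => by rw [h], fun h => (List.cons.inj h).2⟩
      · simp [hxy]

-- withinOne accepts iff the zip mismatch count is at most 1.
theorem withinOne_iff (xs ys : List Char) :
    withinOne xs ys = true ↔ (xs.zip ys).countP (fun p => p.1 ≠ p.2) ≤ 1 := by
  induction xs generalizing ys with
  | nil => simp [withinOne]
  | cons x xs ih =>
    cases ys with
    | nil => simp [withinOne]
    | cons y ys =>
      by_cases hxy : x = y
      · simp only [withinOne, List.zip_cons_cons, List.countP_cons, hxy]
        simpa using ih ys
      · simp only [withinOne, if_neg hxy, List.zip_cons_cons, List.countP_cons,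
          decide_eq_true_eq]
        rw [← countP_zip_eq_zero_iff, if_pos hxy]
        omega

-- ===== VERDICT (by name: the statement is the Claim_ definition above) =====
theorem check_reads_spec : Claim_equal_check_reads := by
  intro read1 read2 _ _
  unfold Spec_check_reads check_reads check_reads_alt
  simp only [String.toList_ofList]
  rw [checkLoopA_eq _ 0 0 read2 (by omega)]
  rw [countP_zip3_fst _ _ _ (by simp), countP_zip3_snd _ _ _ (by simp)]
  have e1 := withinOne_iff read1.toList read2.toList
  have e2 := withinOne_iff read1.toList ((read2.toList.map pyComplement).reverse)
  by_cases hc : (read1.toList.zip read2.toList).countP (fun p => p.1 ≠ p.2) ≤ 1 ∨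
      (read1.toList.zip ((read2.toList.map pyComplement).reverse)).countP
        (fun p => p.1 ≠ p.2) ≤ 1
  · have hb : (withinOne read1.toList read2.toList ||
        withinOne read1.toList ((read2.toList.map pyComplement).reverse)) = true := by
      rcases hc with h | h
      · rw [e1.mpr h, Bool.true_or]
      · rw [e2.mpr h, Bool.or_true]
    rw [if_pos (by omega), if_pos hb]
  · have h1 : withinOne read1.toList read2.toList = false := by
      cases hw : withinOne read1.toList read2.toList
      · rfl
      · exact absurd (Or.inl (e1.mp hw)) hc
    have h2 : withinOne read1.toList ((read2.toList.map pyComplement).reverse) = false := by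
      cases hw : withinOne read1.toList ((read2.toList.map pyComplement).reverse)
      · rfl
      · exact absurd (Or.inr (e2.mp hw)) hc
    rw [if_neg (by simp only [not_or] at hc; omega), if_neg (by rw [h1, h2, Bool.or_self]; exact Bool.false_ne_true)]
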